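-- pv_equiv track=rewrite | github.com/KR0915/python-algorithm | C - 1122 Substring.py | max_11_22_substring
-- ===== SOURCE A (Python) =====
-- def max_11_22_substring(N, S):
--     max_length = 0
--     left_ones = [0] * N
--     right_twos = [0] * N
--
--     count = 0
--     for i in range(N):
--         if S[i] == '1':
--             count += 1
--         else:
--             count = 0
--         left_ones[i] = count
--
--     count = 0
--     for i in range(N - 1, -1, -1):
--         if S[i] == '2':
--             count += 1
--         else:
--             count = 0
--         right_twos[i] = count
--
--     for i in range(N):
--         if S[i] == '/':
--             left_count = left_ones[i - 1] if i > 0 else 0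
--             right_count = right_twos[i + 1] if i < N - 1 else 0
--             max_length = max(max_length, 1 + 2 * min(left_count, right_count))
--
--     return max_length
-- ===== SOURCE B (Python) =====
-- def max_11_22_substring(N, S):
--     best = 0
--     ones = 0        # current run of consecutive '1's ending here
--     in_twos = False # are we counting '2's right after a '/'?
--     left = 0        # '1'-run length just before the last '/'
--     twos = 0        # '2's seen since that '/'
--     for i in range(N):
--         ch = S[i]
--         if ch == '1':
--             ones += 1
--             in_twos = False
--         elif ch == '/':
--             left = ones
--             ones = 0
--             twos = 0
--             in_twos = True
--             best = max(best, 1)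
--         elif ch == '2':
--             if in_twos:
--                 twos += 1
--                 best = max(best, 1 + 2 * min(left, twos))
--             ones = 0
--         else:
--             ones = 0
--             in_twos = False
--     return best
-- ===== Notes on version B (the rewrite author's own statement) =====
-- stated objective: faster
-- what changed: Replaced the three passes with two precomputed prefix/suffix run arrays (left_ones, right_twos) by a single forward pass over the string keeping only scalar state (current 1-run, the 1-run before the last slash, and the 2-count after it), updating the maximum as each '2' arrives.
import Mathlib
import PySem

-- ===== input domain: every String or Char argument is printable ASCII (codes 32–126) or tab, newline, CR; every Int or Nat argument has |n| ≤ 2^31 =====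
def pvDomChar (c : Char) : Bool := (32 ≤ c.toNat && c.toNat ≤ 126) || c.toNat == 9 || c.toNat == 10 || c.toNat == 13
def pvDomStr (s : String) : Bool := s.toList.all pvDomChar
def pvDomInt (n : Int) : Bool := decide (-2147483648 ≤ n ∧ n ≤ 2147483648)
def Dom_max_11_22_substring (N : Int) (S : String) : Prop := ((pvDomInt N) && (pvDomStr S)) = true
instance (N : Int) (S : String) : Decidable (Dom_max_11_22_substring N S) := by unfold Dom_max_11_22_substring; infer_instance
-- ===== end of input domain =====

-- B replaces A's three passes and two run-length arrays by one forward pass with scalar state; same O(n) cost, O(1) space (alternative decomposition).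


-- ===== PORT A =====
-- first loop: count run of '1's left-to-right, recording `count` at each index
def pvBuildLeft : Int → List Char → List Int
  | _, [] => []
  | count, c :: cs =>
    let count' := if c = '1' then count + 1 else 0
    count' :: pvBuildLeft count' cs

-- second loop body: same scan counting '2's (run over the REVERSED string, see port)
def pvBuildRight2 : Int → List Char → List Int
  | _, [] => []
  | count, c :: cs =>
    let count' := if c = '2' then count + 1 else 0
    count' :: pvBuildRight2 count' cs

-- third loop over i: reads S[i], left_ones[i-1] (carried as prev, 0 at i = 0)
-- and right_twos[i+1] (head of the remaining right_twos, 0 at i = N-1)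
def pvThirdA : Int → List Char → List Int → List Int → Int → Int
  | _, [], _, _, acc => acc
  | prev, c :: cs, lo, rt, acc =>
    let acc' := if c = '/' then
        max acc (1 + 2 * min prev ((rt.tail).headD 0))
      else acc
    pvThirdA (lo.headD 0) cs lo.tail rt.tail acc'

def max_11_22_substring (N : Int) (S : String) : Int :=
  -- inside Pre_ (N ≤ len S), the loops over range(N) read exactly the first N chars
  let t := S.toList.take N.toNat
  let left_ones := pvBuildLeft 0 t
  let right_twos := (pvBuildRight2 0 t.reverse).reverse   -- the Python loop runs i = N-1 … 0
  pvThirdA 0 t left_ones right_twos 0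

-- ===== PORT B =====
def pvLoopB : Int → Int → Bool → Int → Int → List Char → Int
  | best, _, _, _, _, [] => best
  | best, ones, in2, left, twos, c :: cs =>
    if c = '1' then pvLoopB best (ones + 1) false left twos cs
    else if c = '/' then pvLoopB (max best 1) 0 true ones 0 cs
    else if c = '2' then
      if in2 then pvLoopB (max best (1 + 2 * min left (twos + 1))) 0 true left (twos + 1) cs
      else pvLoopB best 0 false left twos cs
    else pvLoopB best 0 false left twos cs

def max_11_22_substring_alt (N : Int) (S : String) : Int :=
  pvLoopB 0 0 false 0 0 (S.toList.take N.toNat)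

-- ===== PRECONDITION & SPEC =====
-- Python A raises IndexError on S[i] exactly when N > len(S); nothing else is excluded.
def Pre_max_11_22_substring (N : Int) (S : String) : Prop := N ≤ (S.toList.length : Int)
instance (N : Int) (S : String) : Decidable (Pre_max_11_22_substring N S) := by
  unfold Pre_max_11_22_substring; infer_instance

def pvWitness_max_11_22_substring : Int × String := (5, "11/22")

def Spec_max_11_22_substring (N : Int) (S : String) (out : Int) : Prop := out = max_11_22_substring_alt N S
instance (N : Int) (S : String) (out : Int) : Decidable (Spec_max_11_22_substring N S out) := by unfold Spec_max_11_22_substring; infer_instance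

-- ===== CLAIM (what is proved, stated in full; the proofs are below) =====
def Claim_equal_max_11_22_substring : Prop := ∀ (N : Int) (S : String), Dom_max_11_22_substring N S → Pre_max_11_22_substring N S → Spec_max_11_22_substring N S (max_11_22_substring N S)

-- ===== LEMMAS AND PROOFS =====

-- reference value: g ones cs = best 11/22 value over slashes in cs, `ones` = current '1'-run
def pvLead2 : List Char → Int
  | [] => 0
  | c :: cs => if c = '2' then pvLead2 cs + 1 else 0

def pvG : Int → List Char → Int
  | _, [] => 0
  | ones, c :: cs =>
    if c = '1' then pvG (ones + 1) cs
    else if c = '/' then max (1 + 2 * min ones (pvLead2 cs)) (pvG 0 cs)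
    else pvG 0 cs

-- structural form of A's right_twos array
def pvRtSpec : List Char → List Int
  | [] => []
  | c :: cs => (if c = '2' then (pvRtSpec cs).headD 0 + 1 else 0) :: pvRtSpec cs

theorem pvLead2_nonneg (cs : List Char) : 0 ≤ pvLead2 cs := by
  induction cs with
  | nil => simp [pvLead2]
  | cons c cs ih => simp only [pvLead2]; split_ifs <;> omega

theorem pvG_nonneg (ones : Int) (cs : List Char) : 0 ≤ pvG ones cs := by
  induction cs generalizing ones with
  | nil => simp [pvG]
  | cons c cs ih =>
    simp only [pvG]
    split_ifs
    · exact ih _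
    · exact le_max_of_le_right (ih 0)
    · exact ih _

theorem pvBuildRight2_append (count : Int) (xs : List Char) (c : Char) :
    pvBuildRight2 count (xs ++ [c]) =
      pvBuildRight2 count xs ++
        [if c = '2' then (pvBuildRight2 count xs).getLastD count + 1 else 0] := by
  induction xs generalizing count with
  | nil => simp [pvBuildRight2]
  | cons x xs ih =>
    simp only [List.cons_append, pvBuildRight2, ih, List.getLastD_cons]

theorem getLastD_eq_headD_reverse (l : List Int) (d : Int) :
    l.getLastD d = l.reverse.headD d := by
  induction l with
  | nil => rfl
  | cons x xs ih =>
    cases xs with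
    | nil => simp
    | cons y ys => simp_all

theorem pvRt_port_eq_spec (t : List Char) :
    (pvBuildRight2 0 t.reverse).reverse = pvRtSpec t := by
  induction t with
  | nil => rfl
  | cons c cs ih =>
    have h := pvBuildRight2_append 0 cs.reverse c
    simp only [List.reverse_cons, h, List.reverse_append, List.reverse_cons,
      List.reverse_nil, List.nil_append, List.cons_append, pvRtSpec, ih]
    rw [getLastD_eq_headD_reverse, ih]

theorem pvRtSpec_headD (cs : List Char) : (pvRtSpec cs).headD 0 = pvLead2 cs := by
  induction cs with
  | nil => rfl
  | cons c cs ih => simp only [pvRtSpec, pvLead2, List.headD_cons, ih]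

theorem pvThirdA_eq_g (cs : List Char) (ones acc : Int) (hacc : 0 ≤ acc) :
    pvThirdA ones cs (pvBuildLeft ones cs) (pvRtSpec cs) acc = max acc (pvG ones cs) := by
  induction cs generalizing ones acc with
  | nil => simp [pvThirdA, pvG]; omega
  | cons c cs ih =>
    simp only [pvBuildLeft, pvRtSpec, pvThirdA, pvG, List.tail_cons, List.headD_cons,
      pvRtSpec_headD]
    by_cases h1 : c = '1'
    · simp only [h1, if_true, if_neg (by decide : ¬('1':Char) = '/')]
      rw [ih _ _ hacc]
    · by_cases hs : c = '/'
      · simp only [hs, if_true, if_neg (by decide : ¬('/':Char) = '1')]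
        have hLe : (0:Int) ≤ max acc (1 + 2 * min ones (pvLead2 cs)) := le_max_of_le_left hacc
        rw [ih 0 _ hLe]
        have := pvG_nonneg 0 cs
        have := pvLead2_nonneg cs
        omega
      · simp only [if_neg h1, if_neg hs]
        rw [ih _ _ hacc]

theorem portA_eq_g (t : List Char) :
    pvThirdA 0 t (pvBuildLeft 0 t) ((pvBuildRight2 0 t.reverse).reverse) 0 = pvG 0 t := by
  rw [pvRt_port_eq_spec, pvThirdA_eq_g t 0 0 le_rfl]
  have := pvG_nonneg 0 t
  omega

theorem pvLoopB_eq_g (cs : List Char) (best ones left twos : Int) (in2 : Bool)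
    (hb : 0 ≤ best) (ho : 0 ≤ ones)
    (hm : in2 = true → 1 + 2 * min left twos ≤ best) :
    pvLoopB best ones in2 left twos cs =
      max best (max (if in2 then 1 + 2 * min left (twos + pvLead2 cs) else 0)
        (pvG ones cs)) := by
  induction cs generalizing best ones left twos in2 with
  | nil =>
    simp only [pvLoopB, pvG, pvLead2]
    cases in2 with
    | false => simp; omega
    | true => have := hm rfl; simp; omega
  | cons c cs ih =>
    have hL := pvLead2_nonneg cs
    by_cases h1 : c = '1'
    · simp only [pvLoopB, pvG, pvLead2, h1,
        if_neg (by decide : ¬('1' = '/')), if_neg (by decide : ¬('1' = '2'))]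
      rw [ih best (ones + 1) left twos false hb (by omega) (by simp)]
      cases in2 with
      | false => simp
      | true => have := hm rfl; simp; omega
    · by_cases hs : c = '/'
      · simp only [pvLoopB, pvG, pvLead2, hs, if_neg (by decide : ¬('/' = '1')),
          if_neg (by decide : ¬('/' = '2'))]
        rw [ih (max best 1) 0 ones 0 true (by omega) le_rfl (by intro _; omega)]
        have hG := pvG_nonneg 0 cs
        cases in2 with
        | false => simp; omega
        | true => have := hm rfl; simp; omega
      · by_cases h2 : c = '2'
        · simp only [pvLoopB, pvG, pvLead2, h2, if_neg (by decide : ¬('2' = '1')),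
            if_neg (by decide : ¬('2' = '/'))]
          cases in2 with
          | false =>
            simp only [Bool.false_eq_true, if_false]
            rw [ih best 0 left twos false hb le_rfl (by simp)]
            simp
          | true =>
            have hbb := hm rfl
            rw [ih (max best (1 + 2 * min left (twos + 1))) 0 left (twos + 1) true
              (by omega) le_rfl (by intro _; omega)]
            have hG := pvG_nonneg 0 cs
            simp; omega
        · simp only [pvLoopB, pvG, pvLead2, if_neg h1, if_neg hs, if_neg h2]
          rw [ih best 0 left twos false hb le_rfl (by simp)]
          cases in2 with
          | false => simp
          | true => have := hm rfl; simp; omega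

-- ===== VERDICT (by name: the statement is the Claim_ definition above) =====
theorem max_11_22_substring_spec : Claim_equal_max_11_22_substring := by
  intro N S _ _
  unfold Spec_max_11_22_substring max_11_22_substring max_11_22_substring_alt
  rw [portA_eq_g, pvLoopB_eq_g _ 0 0 0 0 false le_rfl le_rfl (by simp)]
  have := pvG_nonneg 0 (S.toList.take N.toNat)
  simp; omega
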